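-- pv_equiv track=rewrite | github.com/AlessandroMarelli-pro/muzo | ai-service/trainers/filename_parser/hybrid_parser.py | remove_extension
-- ===== SOURCE A (Python) =====
-- def remove_extension(filename: str) -> str:
--     """Remove file extension from filename"""
--     if not filename:
--         return filename
--
--     # Common audio extensions
--     extensions = [
--         ".mp3",
--         ".wav",
--         ".flac",
--         ".m4a",
--         ".aac",
--         ".ogg",
--         ".wma",
--         ".aiff",
--         ".opus",
--     ]
--
--     for ext in extensions:
--         if filename.lower().endswith(ext):
--             return filename[: -len(ext)]
--
--     return filename
-- ===== SOURCE B (Python) =====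
-- _AUDIO_EXTS = {"mp3", "wav", "flac", "m4a", "aac", "ogg", "wma", "aiff", "opus"}
--
--
-- def remove_extension(filename: str) -> str:
--     """Remove file extension from filename"""
--     idx = filename.rfind(".")
--     if idx != -1 and filename[idx + 1:].lower() in _AUDIO_EXTS:
--         return filename[:idx]
--     return filename
-- ===== Notes on version B (the rewrite author's own statement) =====
-- stated objective: idiomatic
-- what changed: Instead of looping over nine candidate extensions and testing endswith on the lowercased whole string for each, B locates the last dot once with rfind and does a single set-membership test on the lowercased suffix after it.
import Mathlib
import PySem

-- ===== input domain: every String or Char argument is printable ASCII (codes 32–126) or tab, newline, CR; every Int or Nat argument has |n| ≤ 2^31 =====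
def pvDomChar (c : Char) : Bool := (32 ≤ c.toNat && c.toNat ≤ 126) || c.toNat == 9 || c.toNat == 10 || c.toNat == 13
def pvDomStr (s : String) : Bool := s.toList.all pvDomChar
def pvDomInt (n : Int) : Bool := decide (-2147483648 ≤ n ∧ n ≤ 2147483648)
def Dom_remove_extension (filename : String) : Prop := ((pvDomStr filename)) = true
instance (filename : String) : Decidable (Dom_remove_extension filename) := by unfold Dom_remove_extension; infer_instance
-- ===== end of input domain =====

-- B replaces A's loop of nine endswith tests on the lowercased whole string by one rfind('.')
-- plus a single set lookup of the lowercased suffix after the last dot (objective: idiomatic).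

-- ===== PORT A =====
-- the early-return for-loop over the extension list, as a recursion over that list
def pvLoopA (filename : String) : List String → String
  | [] => filename
  | ext :: rest =>
      if PySem.Str.endswith (PySem.Str.lower filename) ext then
        PySem.Str.slice filename none (some (-(PySem.Str.len ext)))
      else pvLoopA filename rest

def remove_extension (filename : String) : String :=
  if filename = "" then filename
  else pvLoopA filename [".mp3", ".wav", ".flac", ".m4a", ".aac", ".ogg", ".wma", ".aiff", ".opus"]

-- ===== PORT B =====
def pvAudioExts : PySem.Set String :=
  PySem.Set.ofList ["mp3", "wav", "flac", "m4a", "aac", "ogg", "wma", "aiff", "opus"]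

def remove_extension_alt (filename : String) : String :=
  let idx := PySem.Str.rfind filename "."
  if idx ≠ -1 ∧ PySem.Str.lower (PySem.Str.slice filename (some (idx + 1)) none) ∈ pvAudioExts then
    PySem.Str.slice filename none (some idx)
  else filename

-- ===== PRECONDITION & SPEC =====
def Spec_remove_extension (filename : String) (out : String) : Prop := out = remove_extension_alt filename
instance (filename : String) (out : String) : Decidable (Spec_remove_extension filename out) := by unfold Spec_remove_extension; infer_instance

-- ===== CLAIM (what is proved, stated in full; the proofs are below) =====
def Claim_equal_remove_extension : Prop := ∀ (filename : String), Dom_remove_extension filename → Spec_remove_extension filename (remove_extension filename)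

-- ===== LEMMAS AND PROOFS =====

theorem lowerChar_dot_iff (c : Char) : PySem.Chars.lowerChar c = '.' ↔ c = '.' := by
  constructor
  · intro h
    unfold PySem.Chars.lowerChar PySem.Chars.isupper at h
    split at h
    · rename_i hu
      simp only [Bool.and_eq_true, decide_eq_true_eq] at hu
      have h1 : ('A').toNat ≤ c.toNat := hu.1
      have h2 : c.toNat ≤ ('Z').toNat := hu.2
      have hA : ('A').toNat = 65 := by decide
      have hZ : ('Z').toNat = 90 := by decide
      have hdot : ('.').toNat = 46 := by decide
      exfalso
      have h3 := congrArg Char.toNat h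
      rw [Char.toNat_ofNat] at h3
      have hv : Nat.isValidChar (c.toNat + 32) := by left; omega
      rw [if_pos hv] at h3
      omega
    · exact h
  · intro h; subst h; decide

theorem prefix_dot_iff (cs : List Char) (i : Nat) :
    (['.'] : List Char).isPrefixOf (cs.drop i) = true ↔ cs[i]? = some '.' := by
  rw [List.isPrefixOf_iff_prefix, ← List.head?_drop]
  cases cs.drop i with
  | nil => simp
  | cons a t => simp [List.cons_prefix_iff]

theorem rfind_go_dot_eq (cs : List Char) (k : Nat) (hk : cs[k]? = some '.') :
    ∀ n, k ≤ n → (∀ i, k < i → i ≤ n → cs[i]? ≠ some '.') →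
      PySem.Chars.rfind.go cs ['.'] n = (k : Int) := by
  intro n
  induction n with
  | zero =>
      intro hkn _
      have hk0 : k = 0 := Nat.le_zero.mp hkn
      subst hk0
      have h0 := (prefix_dot_iff cs 0).mpr hk
      rw [List.drop_zero] at h0
      rw [PySem.Chars.rfind.go, if_pos h0]
      simp
  | succ j ih =>
      intro hkn hafter
      by_cases hkj : k = j + 1
      · subst hkj
        rw [PySem.Chars.rfind.go, if_pos ((prefix_dot_iff cs (j+1)).mpr hk)]
      · have hkle : k ≤ j := by omega
        rw [PySem.Chars.rfind.go,
            if_neg (by rw [prefix_dot_iff]; exact hafter (j+1) (by omega) le_rfl)]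
        exact ih hkle (fun i h1 h2 => hafter i h1 (by omega))

theorem rfind_dot_eq (cs : List Char) (k : Nat) (hk : cs[k]? = some '.')
    (hafter : ∀ i, k < i → cs[i]? ≠ some '.') :
    PySem.Chars.rfind cs ['.'] = (k : Int) := by
  have hklt : k < cs.length := by
    by_contra h
    rw [List.getElem?_eq_none (by omega)] at hk
    simp at hk
  exact rfind_go_dot_eq cs k hk cs.length (by omega) (fun i h1 _ => hafter i h1)

theorem rfind_go_dot_mem (cs : List Char) :
    ∀ n, PySem.Chars.rfind.go cs ['.'] n = -1 ∨
      ∃ k : Nat, PySem.Chars.rfind.go cs ['.'] n = (k : Int) ∧ cs[k]? = some '.' := by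
  intro n
  induction n with
  | zero =>
      rw [PySem.Chars.rfind.go]
      split
      · rename_i h
        exact Or.inr ⟨0, rfl, (prefix_dot_iff cs 0).mp (by simpa using h)⟩
      · exact Or.inl rfl
  | succ j ih =>
      rw [PySem.Chars.rfind.go]
      split
      · rename_i h
        exact Or.inr ⟨j + 1, by simp, (prefix_dot_iff cs (j+1)).mp h⟩
      · exact ih

theorem slice_neg_to (xs : List Char) (m : Nat) (h0 : 0 < m) (hm : m ≤ xs.length) :
    PySem.List.slice xs none (some (-(m:Int))) = xs.take (xs.length - m) := by
  unfold PySem.List.slice PySem.List.clampIdx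
  simp only []
  split_ifs with h1 h2 <;> [skip; skip; omega] <;> [omega; skip]
  congr 1
  omega

-- if there is a dot at k and the lowered tail after it is e, then '.'::e is a suffix of the lowered string
theorem suffix_of_dot_at (cs e : List Char) (k : Nat) (hklt : k < cs.length)
    (hk : cs[k] = '.') (hlow : PySem.Chars.lower (cs.drop (k+1)) = e) :
    ('.' :: e) <:+ PySem.Chars.lower cs := by
  refine ⟨PySem.Chars.lower (cs.take k), ?_⟩
  unfold PySem.Chars.lower at *
  conv_rhs => rw [← List.take_append_drop k cs, List.drop_eq_getElem_cons hklt]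
  rw [List.map_append, List.map_cons, hk, hlow]
  rfl

-- decomposition of a matched extension: position of the last dot and the lowered tail after it
theorem match_case (cs e : List Char) (he : '.' ∉ e)
    (h : ('.' :: e) <:+ PySem.Chars.lower cs) :
    ∃ k : Nat, cs.length = k + 1 + e.length ∧
      PySem.Chars.rfind cs ['.'] = (k : Int) ∧
      PySem.Chars.lower (cs.drop (k+1)) = e := by
  obtain ⟨pre, hpre⟩ := h
  unfold PySem.Chars.lower at hpre
  obtain ⟨cs₁, cs₂, hcs, hm1, hm2⟩ := List.map_eq_append_iff.mp hpre.symm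
  obtain ⟨c, cs₃, hcs₂, hc, hm3⟩ := List.map_eq_cons_iff.mp hm2
  have hcdot : c = '.' := (lowerChar_dot_iff c).mp hc
  subst hcdot
  subst hcs₂
  subst hcs
  refine ⟨cs₁.length, ?_, ?_, ?_⟩
  · have := congrArg List.length hm3
    simp at this ⊢
    omega
  · apply rfind_dot_eq
    · simp
    · intro i hi
      rw [List.getElem?_append_right (by omega)]
      rcases Nat.exists_eq_add_of_lt hi with ⟨j, rfl⟩
      rw [show cs₁.length + j + 1 - cs₁.length = j + 1 from by omega, List.getElem?_cons_succ]
      intro hbad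
      have hmem : '.' ∈ cs₃ := List.mem_of_getElem? hbad
      have : PySem.Chars.lowerChar '.' ∈ e := hm3 ▸ List.mem_map_of_mem hmem
      rw [(lowerChar_dot_iff '.').mpr rfl] at this
      exact he this
  · rw [show cs₁ ++ '.' :: cs₃ = (cs₁ ++ ['.']) ++ cs₃ from by simp,
        show cs₁.length + 1 = (cs₁ ++ ['.']).length from by simp, List.drop_left]
    exact hm3

-- the B side on a hit: the matched extension is exactly the text after the last dot
theorem branch_hit (filename ext : String) (e : List Char)
    (hext : ext.toList = '.' :: e) (he : '.' ∉ e)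
    (hmem : String.ofList e ∈ pvAudioExts)
    (h : PySem.Str.endswith (PySem.Str.lower filename) ext = true) :
    PySem.Str.slice filename none (some (-(PySem.Str.len ext))) = remove_extension_alt filename := by
  rw [PySem.Str.endswith_eq, PySem.Str.toList_lower, hext] at h
  obtain ⟨k, hlen, hrfind, hlow⟩ :=
    match_case filename.toList e he ((PySem.Chars.endswith_iff _ _).mp h)
  have hdotlist : ("." : String).toList = ['.'] := by decide
  have hidx : PySem.Str.rfind filename "." = (k : Int) := by
    rw [PySem.Str.rfind_eq, hdotlist]; exact hrfind
  have hsuffix : PySem.Str.lower (PySem.Str.slice filename (some ((k:Int) + 1)) none) = String.ofList e := by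
    apply String.toList_inj.mp
    rw [PySem.Str.toList_lower, PySem.Str.toList_slice]
    rw [show PySem.Chars.slice filename.toList (some ((k:Int)+1)) none
          = PySem.List.slice filename.toList (some ((k:Int)+1)) none from rfl]
    rw [PySem.List.slice_from _ (by omega)]
    rw [show ((k:Int)+1).toNat = k + 1 from by omega]
    simpa using hlow
  simp only [remove_extension_alt, hidx]
  rw [if_pos ⟨by omega, hsuffix ▸ hmem⟩]
  apply String.toList_inj.mp
  rw [PySem.Str.toList_slice, PySem.Str.toList_slice]
  have hlenext : PySem.Str.len ext = ((1 + e.length : Nat) : Int) := by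
    unfold PySem.Str.len
    rw [hext]
    simp; omega
  rw [hlenext]
  rw [show PySem.Chars.slice filename.toList none (some (-((1 + e.length : Nat) : Int)))
        = PySem.List.slice filename.toList none (some (-((1 + e.length : Nat) : Int))) from rfl,
      show PySem.Chars.slice filename.toList none (some (k:Int))
        = PySem.List.slice filename.toList none (some (k:Int)) from rfl]
  rw [slice_neg_to _ _ (by omega) (by omega), PySem.List.slice_to _ (by omega)]
  congr 1
  omega

-- a dot at k whose lowered tail is a known extension contradicts the corresponding failed endswith
theorem miss_contra (filename : String) (k : Nat) (hklt : k < filename.toList.length)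
    (hk : filename.toList[k] = '.')
    (ext : String) (e : List Char) (hext : ext.toList = '.' :: e)
    (hlow : PySem.Chars.lower (filename.toList.drop (k+1)) = e)
    (hfalse : PySem.Str.endswith (PySem.Str.lower filename) ext = false) : False := by
  have hs := suffix_of_dot_at filename.toList e k hklt hk hlow
  rw [PySem.Str.endswith_eq, PySem.Str.toList_lower, hext] at hfalse
  rw [← PySem.Chars.endswith_iff] at hs
  rw [hfalse] at hs
  exact Bool.noConfusion hs

-- the B side on a miss: no extension matched, so B's condition is false
theorem branch_miss (filename : String)
    (h1 : PySem.Str.endswith (PySem.Str.lower filename) ".mp3" = false)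
    (h2 : PySem.Str.endswith (PySem.Str.lower filename) ".wav" = false)
    (h3 : PySem.Str.endswith (PySem.Str.lower filename) ".flac" = false)
    (h4 : PySem.Str.endswith (PySem.Str.lower filename) ".m4a" = false)
    (h5 : PySem.Str.endswith (PySem.Str.lower filename) ".aac" = false)
    (h6 : PySem.Str.endswith (PySem.Str.lower filename) ".ogg" = false)
    (h7 : PySem.Str.endswith (PySem.Str.lower filename) ".wma" = false)
    (h8 : PySem.Str.endswith (PySem.Str.lower filename) ".aiff" = false)
    (h9 : PySem.Str.endswith (PySem.Str.lower filename) ".opus" = false) :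
    remove_extension_alt filename = filename := by
  simp only [remove_extension_alt]
  rw [if_neg]
  rintro ⟨hne, hmem⟩
  rcases rfind_go_dot_mem filename.toList filename.toList.length with hcase | ⟨k, hgo, hdot⟩
  · apply hne
    rw [PySem.Str.rfind_eq, show ("." : String).toList = ['.'] from by decide]
    exact hcase
  · have hidx : PySem.Str.rfind filename "." = (k : Int) := by
      rw [PySem.Str.rfind_eq, show ("." : String).toList = ['.'] from by decide]
      exact hgo
    rw [hidx] at hmem
    have hklt : k < filename.toList.length := by
      by_contra hc
      rw [List.getElem?_eq_none (by omega)] at hdot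
      simp at hdot
    have hkval : filename.toList[k] = '.' := by
      rw [List.getElem?_eq_getElem hklt] at hdot
      exact Option.some.inj hdot
    have hS : PySem.Chars.lower (filename.toList.drop (k+1)) =
        (PySem.Str.lower (PySem.Str.slice filename (some ((k:Int) + 1)) none)).toList := by
      rw [PySem.Str.toList_lower, PySem.Str.toList_slice]
      rw [show PySem.Chars.slice filename.toList (some ((k:Int)+1)) none
            = PySem.List.slice filename.toList (some ((k:Int)+1)) none from rfl]
      rw [PySem.List.slice_from _ (by omega)]
      rw [show ((k:Int)+1).toNat = k + 1 from by omega]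
    rw [pvAudioExts, PySem.Set.mem_ofList] at hmem
    set s' := PySem.Str.lower (PySem.Str.slice filename (some ((k:Int) + 1)) none) with hs'
    simp only [List.mem_cons] at hmem
    rcases hmem with h | h | h | h | h | h | h | h | h | h
    · exact miss_contra filename k hklt hkval ".mp3" ("mp3" : String).toList (by decide) (by rw [hS, h]) h1
    · exact miss_contra filename k hklt hkval ".wav" ("wav" : String).toList (by decide) (by rw [hS, h]) h2
    · exact miss_contra filename k hklt hkval ".flac" ("flac" : String).toList (by decide) (by rw [hS, h]) h3
    · exact miss_contra filename k hklt hkval ".m4a" ("m4a" : String).toList (by decide) (by rw [hS, h]) h4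
    · exact miss_contra filename k hklt hkval ".aac" ("aac" : String).toList (by decide) (by rw [hS, h]) h5
    · exact miss_contra filename k hklt hkval ".ogg" ("ogg" : String).toList (by decide) (by rw [hS, h]) h6
    · exact miss_contra filename k hklt hkval ".wma" ("wma" : String).toList (by decide) (by rw [hS, h]) h7
    · exact miss_contra filename k hklt hkval ".aiff" ("aiff" : String).toList (by decide) (by rw [hS, h]) h8
    · exact miss_contra filename k hklt hkval ".opus" ("opus" : String).toList (by decide) (by rw [hS, h]) h9
    · simp at h

-- ===== VERDICT (by name: the statement is the Claim_ definition above) =====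
theorem remove_extension_spec : Claim_equal_remove_extension := by
  intro filename _
  unfold Spec_remove_extension remove_extension
  by_cases h0 : filename = ""
  · subst h0
    rw [if_pos rfl]
    decide
  · rw [if_neg h0]
    simp only [pvLoopA]
    split_ifs with h1 h2 h3 h4 h5 h6 h7 h8 h9
    · exact branch_hit filename ".mp3" ("mp3" : String).toList (by decide) (by decide) (by decide) h1
    · exact branch_hit filename ".wav" ("wav" : String).toList (by decide) (by decide) (by decide) h2
    · exact branch_hit filename ".flac" ("flac" : String).toList (by decide) (by decide) (by decide) h3
    · exact branch_hit filename ".m4a" ("m4a" : String).toList (by decide) (by decide) (by decide) h4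
    · exact branch_hit filename ".aac" ("aac" : String).toList (by decide) (by decide) (by decide) h5
    · exact branch_hit filename ".ogg" ("ogg" : String).toList (by decide) (by decide) (by decide) h6
    · exact branch_hit filename ".wma" ("wma" : String).toList (by decide) (by decide) (by decide) h7
    · exact branch_hit filename ".aiff" ("aiff" : String).toList (by decide) (by decide) (by decide) h8
    · exact branch_hit filename ".opus" ("opus" : String).toList (by decide) (by decide) (by decide) h9
    · exact (branch_miss filename
        (Bool.not_eq_true _ ▸ Bool.of_not_eq_true h1) (Bool.of_not_eq_true h2)
        (Bool.of_not_eq_true h3) (Bool.of_not_eq_true h4) (Bool.of_not_eq_true h5)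
        (Bool.of_not_eq_true h6) (Bool.of_not_eq_true h7) (Bool.of_not_eq_true h8)
        (Bool.of_not_eq_true h9)).symm
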